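-- pv_equiv track=rewrite | github.com/miliar/Code_Jam_Webscraper | solutions_python/Problem_178/2799.py | solve
-- ===== SOURCE A (Python) =====
-- def flip(stack, i=None):
--     """flip pancakes i-deep"""
--     if i is None:
--         i = len(stack)
--     return [not x for x in reversed(stack[:i])] + stack[i:]
--
-- def prune(stack):
--     while stack and stack[-1]:
--         stack.pop()
--     return stack
--
-- def solve(stack):
--     prune(stack)
--     if not stack: # done
--         return 0
--     if not any(stack): # flip the whole stack
--         return 1
--     if stack[0]:
--         stack = flip(stack, stack.index(False))
--         return solve(stack) + 1
--     else:
--         stack = flip(stack)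
--         return solve(stack) + 1
-- ===== SOURCE B (Python) =====
-- def solve(stack):
--     # One linear pass from the bottom of the stack: each orientation change
--     # (with an imaginary happy pancake below the bottom) costs exactly one flip.
--     flips = 0
--     prev = True
--     for side in reversed(stack):
--         if side != prev:
--             flips += 1
--         prev = side
--     return flips
-- ===== Notes on version B (the rewrite author's own statement) =====
-- stated objective: faster
-- what changed: Replaced the recursive simulate-the-flips algorithm (each step rebuilds the stack via prune/flip/index) by a single linear scan that counts adjacent orientation transitions, seeding with a virtual happy pancake below the bottom.
import Mathlib
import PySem

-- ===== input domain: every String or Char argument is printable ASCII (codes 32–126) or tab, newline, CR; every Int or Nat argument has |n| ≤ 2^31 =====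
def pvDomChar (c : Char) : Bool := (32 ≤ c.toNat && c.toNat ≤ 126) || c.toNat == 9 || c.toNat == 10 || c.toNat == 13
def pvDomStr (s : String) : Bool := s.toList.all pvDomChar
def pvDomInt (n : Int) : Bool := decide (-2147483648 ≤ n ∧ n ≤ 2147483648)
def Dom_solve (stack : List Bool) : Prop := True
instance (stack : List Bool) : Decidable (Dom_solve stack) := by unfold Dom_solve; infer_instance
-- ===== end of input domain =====

-- B replaces A's recursive flip-simulation by one linear pass counting adjacent
-- orientation transitions (seeded with a virtual happy pancake below the bottom);
-- measurably faster. Python A mutates its argument in place (prune pops trailing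
-- happy pancakes); the equivalence proved here is about the RETURN value only.


-- ===== PORT A =====
-- `gN prev l` counts orientation changes in `prev :: l`; it is ONLY the termination
-- measure of `solve` (and the proofs' tool below) — neither port computes with it.
def gN : Bool → List Bool → Nat
  | _, [] => 0
  | prev, x :: xs => (if x ≠ prev then 1 else 0) + gN x xs

-- flip(stack, i=None): [not x for x in reversed(stack[:i])] + stack[i:]
def flipA (stack : List Bool) (i : Option Int) : List Bool :=
  let j := i.getD (stack.length : Int)
  ((PySem.List.slice stack none (some j)).reverse.map (fun x => !x)) ++
    PySem.List.slice stack (some j) none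

-- prune(stack): while stack and stack[-1]: stack.pop()
def pruneA (s : List Bool) : List Bool :=
  match h : s.getLast? with
  | some true => pruneA s.dropLast
  | _ => s
termination_by s.length
decreasing_by
  have hne : s ≠ [] := by intro e; subst e; simp at h
  have := List.length_pos_iff.mpr hne
  simp [List.length_dropLast]; omega

-- ---- facts needed by `solve`'s termination measure (cited in decreasing_by) ----
theorem gN_append (u v : List Bool) (prev : Bool) :
    gN prev (u ++ v) = gN prev u + gN (u.getLastD prev) v := by
  induction u generalizing prev with
  | nil => simp [gN]
  | cons x xs ih =>
    simp only [List.cons_append, gN, ih x, List.getLastD_cons]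
    omega

theorem getLastD_reverse (l : List Bool) (d : Bool) : l.reverse.getLastD d = l.headD d := by
  cases l with
  | nil => rfl
  | cons x xs => simp [List.getLastD_eq_getLast?, List.getLast?_reverse, List.headD]

theorem gN_replicate_self (k : Nat) (b : Bool) : gN b (List.replicate k b) = 0 := by
  induction k with
  | zero => rfl
  | succ n ih => simp [List.replicate_succ, gN, ih]

theorem gN_symm (l : List Bool) (x y : Bool) :
    gN x (l ++ [y]) = gN y (l.reverse ++ [x]) := by
  induction l generalizing x with
  | nil => by_cases h : x = y <;> simp [gN, h]; exact (Ne.symm h)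
  | cons z zs ih =>
    have h1 : gN y ((z :: zs).reverse ++ [x]) = gN y (zs.reverse ++ [z]) + gN z [x] := by
      have := gN_append (zs.reverse ++ [z]) [x] y
      simpa [List.getLastD_concat, List.append_assoc] using this
    simp only [List.cons_append, gN, ih z, h1]
    by_cases h : z = x
    · simp [h]
    · have h' : x ≠ z := Ne.symm h
      simp only [if_pos h, if_pos h']
      omega

theorem pruneA_eq_of_not_last_true (s : List Bool) (h : ¬ s.getLast? = some true) :
    pruneA s = s := by
  rw [pruneA]
  split
  · next heq => exact absurd heq h
  · rfl

theorem pruneA_getLast (s : List Bool) : pruneA s = [] ∨ (pruneA s).getLast? = some false := by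
  induction s using pruneA.induct with
  | case1 s h ih => rw [pruneA, h]; exact ih
  | case2 s h =>
    rw [pruneA_eq_of_not_last_true s (by simpa using h)]
    cases hl : s.getLast? with
    | none => left; exact List.getLast?_eq_none_iff.mp hl
    | some b =>
      cases b
      · right; rfl
      · exact absurd hl (by simpa using h)

theorem gN_pruneA (s : List Bool) : gN true (pruneA s).reverse = gN true s.reverse := by
  induction s using pruneA.induct with
  | case1 s h ih =>
    obtain ⟨l', hl⟩ := List.getLast?_eq_some_iff.mp h
    rw [pruneA, h, ih]
    have hd : s.dropLast = l' := by rw [hl]; simp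
    rw [hd]
    conv_rhs => rw [hl]
    simp [gN, List.reverse_append]
  | case2 s h => rw [pruneA_eq_of_not_last_true s (by simpa using h)]

theorem gN_map_not (l : List Bool) (a : Bool) :
    gN a (l.map (fun x => !x)) = gN (!a) l := by
  induction l generalizing a with
  | nil => rfl
  | cons x xs ih => cases a <;> cases x <;> simp [gN, ih]

-- head-false step: flipping the whole (pruned, bottom-unhappy) stack removes one transition
theorem gN_flip_none (p : List Bool) (hlast : p.getLast? = some false)
    (hh : ¬ p.headD false = true) :
    gN true (flipA p none).reverse + 1 = gN true p.reverse := by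
  -- flipA p none = p.reverse.map not, whose reverse is p.map not
  have hflip : (flipA p none).reverse = p.map (fun x => !x) := by
    simp [flipA, PySem.List.slice_to_natCast, PySem.List.slice_from_natCast,
      List.map_reverse]
  rw [hflip, gN_map_not]
  simp only [Bool.not_true]
  obtain ⟨d, hd⟩ := List.getLast?_eq_some_iff.mp hlast
  subst hd
  have hhd : d.headD false = false := by
    cases d with
    | nil => rfl
    | cons c cs =>
      simp only [List.headD] at hh ⊢
      simpa using hh
  have h2 := gN_symm d false false
  have h3 := gN_append d.reverse [false] false
  rw [getLastD_reverse, hhd] at h3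
  have h4 : gN false ([false] : List Bool) = 0 := by simp [gN]
  have h5 : (d ++ [false]).reverse = false :: d.reverse := by simp
  rw [h5]
  have h6 : gN true (false :: d.reverse) = 1 + gN false d.reverse := by simp [gN]
  rw [h6]
  omega

-- head-true step: flipping down to the first unhappy pancake removes one transition
theorem gN_flip_idx (p : List Bool) (hlast : p.getLast? = some false)
    (hh : p.headD false = true) :
    gN true (flipA p (some ((((PySem.List.index? p false).getD 0 : Nat)) : Int))).reverse + 1
      = gN true p.reverse := by
  have hmem : (false : Bool) ∈ p := List.mem_of_getLast? hlast
  obtain ⟨k, hk⟩ := Option.isSome_iff_exists.mp ((PySem.List.index?_isSome_iff p false).mpr hmem)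
  obtain ⟨pre, suf, hps, hlen, hnot⟩ := (PySem.List.index?_eq_some_iff p false k).mp hk
  have hpre : pre = List.replicate k true := by
    rw [← hlen]
    apply List.eq_replicate_of_mem
    intro b hb
    cases b
    · exact absurd hb hnot
    · rfl
  have hk1 : 1 ≤ k := by
    rcases hpe : pre with _ | ⟨c, cs⟩
    · exfalso; rw [hpe] at hps; rw [hps] at hh; simp [List.headD] at hh
    · rw [← hlen, hpe]; simp
  have hkd : (PySem.List.index? p false).getD 0 = k := by rw [hk]; rfl
  rw [hkd]
  have htake : p.take k = List.replicate k true := by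
    rw [hps, List.take_left' hlen]; exact hpre
  have hdrop : p.drop k = false :: suf := by
    rw [hps, List.drop_left' hlen]
  have hflip : flipA p (some (k : Int)) = List.replicate k false ++ (false :: suf) := by
    simp only [flipA, Option.getD_some, PySem.List.slice_to_natCast,
      PySem.List.slice_from_natCast, htake, hdrop]
    simp [List.map_replicate]
  rw [hflip]
  have hrev1 : (List.replicate k false ++ (false :: suf)).reverse
      = (false :: suf).reverse ++ List.replicate k false := by simp
  have hrev2 : p.reverse = (false :: suf).reverse ++ List.replicate k true := by
    rw [hps, hpre]; simp
  rw [hrev1, hrev2, gN_append, gN_append]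
  have hgl : ((false : Bool) :: suf).reverse.getLastD true = false := by
    rw [getLastD_reverse]; rfl
  rw [hgl]
  have h1 : gN false (List.replicate k false) = 0 := gN_replicate_self k false
  have h2 : gN false (List.replicate k true) = 1 := by
    cases k with
    | zero => omega
    | succ n => simp [List.replicate_succ, gN, gN_replicate_self]
  omega

-- solve(stack): the given recursive algorithm
def solve (stack : List Bool) : Int :=
  let p := pruneA stack
  if _hp : p = [] then 0
  else if p.any id = false then 1
  -- in the remaining branches p ≠ [], so stack[0] is p.headD and
  -- stack.index(False) cannot raise (the pruned stack ends with False)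
  else if _hh : p.headD false = true then
    solve (flipA p (some (((PySem.List.index? p false).getD 0 : Nat) : Int))) + 1
  else
    solve (flipA p none) + 1
termination_by gN true stack.reverse
decreasing_by
  · have hl : (pruneA stack).getLast? = some false :=
      (pruneA_getLast stack).resolve_left _hp
    have := gN_flip_idx (pruneA stack) hl _hh
    rw [← gN_pruneA stack]; omega
  · have hl : (pruneA stack).getLast? = some false :=
      (pruneA_getLast stack).resolve_left _hp
    have := gN_flip_none (pruneA stack) hl _hh
    rw [← gN_pruneA stack]; omega

-- ===== PORT B =====
def solve_alt (stack : List Bool) : Int :=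
  (stack.reverse.foldl
    (fun (st : Int × Bool) side => (if side ≠ st.2 then st.1 + 1 else st.1, side))
    (0, true)).1

-- ===== PRECONDITION & SPEC =====
def Spec_solve (stack : List Bool) (out : Int) : Prop := out = solve_alt stack
instance (stack : List Bool) (out : Int) : Decidable (Spec_solve stack out) := by unfold Spec_solve; infer_instance

-- ===== CLAIM (what is proved, stated in full; the proofs are below) =====
def Claim_equal_solve : Prop := ∀ (stack : List Bool), Dom_solve stack → Spec_solve stack (solve stack)

-- ===== LEMMAS AND PROOFS =====
theorem alt_fold (l : List Bool) (acc : Int) (prev : Bool) :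
    (l.foldl (fun (st : Int × Bool) side => (if side ≠ st.2 then st.1 + 1 else st.1, side))
      (acc, prev)).1 = acc + gN prev l := by
  induction l generalizing acc prev with
  | nil => simp [gN]
  | cons x xs ih =>
    by_cases h : x = prev <;> simp only [List.foldl_cons, gN, h, ih] <;> simp [h] <;> push_cast <;> ring

theorem solve_alt_eq (s : List Bool) : solve_alt s = (gN true s.reverse : Int) := by
  simp only [solve_alt, alt_fold]
  omega

theorem gN_all_false (l : List Bool) (h : ∀ x ∈ l, x = false) : gN false l = 0 := by
  induction l with
  | nil => rfl
  | cons x xs ih =>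
    have hx := h x (by simp)
    subst hx
    simp [gN, ih (fun y hy => h y (by simp [hy]))]

theorem gN_one_of_all_false (p : List Bool) (hne : p ≠ []) (h : p.any id = false) :
    gN true p.reverse = 1 := by
  have hall : ∀ x ∈ p, x = false := by
    intro x hx
    cases x
    · rfl
    · exfalso
      have : p.any id = true := List.any_eq_true.mpr ⟨true, hx, rfl⟩
      rw [h] at this; exact Bool.false_ne_true this
  rcases hr : p.reverse with _ | ⟨c, cs⟩
  · exact absurd (by simpa using congrArg List.reverse hr) hne
  · have hc : c = false := hall c (by rw [← List.mem_reverse, hr]; simp)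
    subst hc
    have h0 : gN false cs = 0 := gN_all_false cs (by
      intro y hy
      exact hall y (by rw [← List.mem_reverse, hr]; simp [hy]))
    simp [gN, h0]

theorem solve_eq_gN (s : List Bool) : solve s = (gN true s.reverse : Int) := by
  suffices H : ∀ n (s : List Bool), gN true s.reverse = n → solve s = (n : Int) by
    exact H _ s rfl
  intro n
  induction n using Nat.strong_induction_on with
  | _ n ih =>
    intro s hs
    rw [solve]
    by_cases h1 : pruneA s = []
    · simp only [h1, dite_true]
      have : gN true (pruneA s).reverse = gN true s.reverse := gN_pruneA s
      rw [h1] at this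
      simp only [List.reverse_nil] at this
      rw [← hs, ← this]
      rfl
    · have hl : (pruneA s).getLast? = some false := (pruneA_getLast s).resolve_left h1
      simp only [h1, dif_neg, not_false_iff]
      by_cases h2 : (pruneA s).any id = false
      · simp only [h2, if_true]
        rw [← hs, ← gN_pruneA s, gN_one_of_all_false (pruneA s) h1 h2]
        rfl
      · simp only [h2]
        by_cases h3 : (pruneA s).headD false = true
        · simp only [h3, dif_pos]
          have key := gN_flip_idx (pruneA s) hl h3
          rw [gN_pruneA s, hs] at key
          have hlt : gN true (flipA (pruneA s)
              (some (((PySem.List.index? (pruneA s) false).getD 0 : Nat) : Int))).reverse < n := by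
            omega
          rw [ih _ hlt _ rfl]
          push_cast
          omega
        · simp only [h3]
          have key := gN_flip_none (pruneA s) hl h3
          rw [gN_pruneA s, hs] at key
          have hlt : gN true (flipA (pruneA s) none).reverse < n := by omega
          rw [ih _ hlt _ rfl]
          push_cast
          omega

-- ===== VERDICT (by name: the statement is the Claim_ definition above) =====
theorem solve_spec : Claim_equal_solve := by
  intro s _
  unfold Spec_solve
  rw [solve_eq_gN, solve_alt_eq]
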